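-- pv_equiv track=rewrite | github.com/sradiouy/deNovoTEsDmel | Scritps/TE_transfer.py | define_block_two_N
-- ===== SOURCE A (Python) =====
-- def define_block_two_N(cigar,blocks,m_values_index,cigartuples):
--     bloques = []
--     count = -1
--     for x in [index for index,value in enumerate(cigar) if value =="N"]:
--         count += 1
--         if m_values_index == count:
--             m_index = cigar[:x].count("M") -1
--             bloques.append(blocks[m_index][1])
--         else:
--             pass
--     return bloques[0]
-- ===== SOURCE B (Python) =====
-- def define_block_two_N(cigar, blocks, m_values_index, cigartuples):
--     # One pass over cigar with two counters instead of building an index list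
--     # and re-scanning the prefix for 'M' at the hit.
--     n_seen = 0
--     m_seen = 0
--     for ch in cigar:
--         if ch == "N":
--             if n_seen == m_values_index:
--                 return blocks[m_seen - 1][1]
--             n_seen += 1
--         elif ch == "M":
--             m_seen += 1
--     raise IndexError("list index out of range")
-- ===== Notes on version B (the rewrite author's own statement) =====
-- stated objective: simpler
-- what changed: Instead of building the list of all N positions and then re-scanning the prefix cigar[:x] to count M's at the hit, B makes a single pass over cigar keeping two counters (N's seen, M's seen) and returns blocks[m_seen-1][1] as soon as the target N is reached.
import Mathlib
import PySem

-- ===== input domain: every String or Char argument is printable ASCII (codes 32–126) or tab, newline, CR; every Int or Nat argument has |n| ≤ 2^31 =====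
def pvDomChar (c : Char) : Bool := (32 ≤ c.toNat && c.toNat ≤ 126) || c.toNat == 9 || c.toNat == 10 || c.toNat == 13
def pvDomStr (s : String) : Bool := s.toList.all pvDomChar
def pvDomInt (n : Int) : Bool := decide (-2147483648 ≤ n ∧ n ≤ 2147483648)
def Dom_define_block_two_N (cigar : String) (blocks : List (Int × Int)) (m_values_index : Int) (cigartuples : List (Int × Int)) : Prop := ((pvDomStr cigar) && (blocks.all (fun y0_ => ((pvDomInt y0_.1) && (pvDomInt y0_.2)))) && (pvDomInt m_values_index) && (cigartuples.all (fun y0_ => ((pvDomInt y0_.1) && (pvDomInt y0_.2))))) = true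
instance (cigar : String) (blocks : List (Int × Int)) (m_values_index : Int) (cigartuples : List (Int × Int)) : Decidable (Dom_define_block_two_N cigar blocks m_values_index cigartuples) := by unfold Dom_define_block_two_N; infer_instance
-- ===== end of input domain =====

-- B replaces A's build-an-N-index-list-then-rescan-the-prefix structure by one pass with two counters; return value only (A/B raise IndexError outside Pre_).
-- ===== PORT A =====
def define_block_two_N (cigar : String) (blocks : List (Int × Int)) (m_values_index : Int) (cigartuples : List (Int × Int)) : Int :=
  -- bloques = []; count = -1; for x in [index for index,value in enumerate(cigar) if value=="N"]: ...
  let idxs : List Int := ((PySem.List.enumerate cigar.toList).filter (fun p => p.2 == 'N')).map (fun p => p.1)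
  let st := idxs.foldl (fun (st : Int × List Int) x =>
      let count := st.1 + 1
      if m_values_index == count then
        -- m_index = cigar[:x].count("M") - 1; bloques.append(blocks[m_index][1])
        let m_index : Int := (PySem.Chars.count (PySem.List.slice cigar.toList none (some x)) ['M'] : Int) - 1
        (count, st.2 ++ [((PySem.List.pyGet? blocks m_index).getD (0, 0)).2])
      else (count, st.2)) (-1, ([] : List Int))
  -- return bloques[0]  (IndexError when empty: excluded by Pre_)
  (PySem.List.pyGet? st.2 0).getD 0

-- ===== PORT B =====
-- one pass over the cigar characters with counters n_seen / m_seen; [] case is Source B's raise (outside Pre_)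
def altGo (blocks : List (Int × Int)) (k : Int) : List Char → Int → Int → Int
  | [], _, _ => 0
  | c :: cs, n, m =>
    if c = 'N' then
      if n = k then ((PySem.List.pyGet? blocks (m - 1)).getD (0, 0)).2
      else altGo blocks k cs (n + 1) m
    else if c = 'M' then altGo blocks k cs n (m + 1)
    else altGo blocks k cs n m

def define_block_two_N_alt (cigar : String) (blocks : List (Int × Int)) (m_values_index : Int) (cigartuples : List (Int × Int)) : Int :=
  altGo blocks m_values_index cigar.toList 0 0

-- ===== PRECONDITION & SPEC =====
-- mCounts l m = for each 'N' of l in order, m plus the number of 'M' characters preceding that 'N' in l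
def mCounts : List Char → Int → List Int
  | [], _ => []
  | c :: cs, m => if c = 'N' then m :: mCounts cs m else if c = 'M' then mCounts cs (m + 1) else mCounts cs m

-- Pre_: the m_values_index-th 'N' exists and blocks[(#M before it) - 1] is a valid Python index — exactly where A returns (otherwise A raises IndexError).
def Pre_define_block_two_N (cigar : String) (blocks : List (Int × Int)) (m_values_index : Int) (cigartuples : List (Int × Int)) : Prop :=
  0 ≤ m_values_index ∧ m_values_index.toNat < (mCounts cigar.toList 0).length ∧
    PySem.Raise.InRange blocks.length ((mCounts cigar.toList 0).getD m_values_index.toNat 0 - 1)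
instance (cigar : String) (blocks : List (Int × Int)) (m_values_index : Int) (cigartuples : List (Int × Int)) : Decidable (Pre_define_block_two_N cigar blocks m_values_index cigartuples) := by unfold Pre_define_block_two_N; infer_instance

def pvWitness_define_block_two_N : String × (List (Int × Int)) × Int × (List (Int × Int)) := ("MNMN", [(1, 5), (2, 7)], 1, [])

def Spec_define_block_two_N (cigar : String) (blocks : List (Int × Int)) (m_values_index : Int) (cigartuples : List (Int × Int)) (out : Int) : Prop := out = define_block_two_N_alt cigar blocks m_values_index cigartuples
instance (cigar : String) (blocks : List (Int × Int)) (m_values_index : Int) (cigartuples : List (Int × Int)) (out : Int) : Decidable (Spec_define_block_two_N cigar blocks m_values_index cigartuples out) := by unfold Spec_define_block_two_N; infer_instance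

-- ===== CLAIM (what is proved, stated in full; the proofs are below) =====
def Claim_equal_define_block_two_N : Prop := ∀ (cigar : String) (blocks : List (Int × Int)) (m_values_index : Int) (cigartuples : List (Int × Int)), Dom_define_block_two_N cigar blocks m_values_index cigartuples → Pre_define_block_two_N cigar blocks m_values_index cigartuples → Spec_define_block_two_N cigar blocks m_values_index cigartuples (define_block_two_N cigar blocks m_values_index cigartuples)

-- ===== LEMMAS AND PROOFS =====

-- the value A appends for a given count v of preceding 'M's
def pvVal (blocks : List (Int × Int)) (v : Int) : Int := ((PySem.List.pyGet? blocks (v - 1)).getD (0, 0)).2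

-- what A's fold appends, as a function of the list of preceding-'M' counts and the remaining target t
def pvPick (blocks : List (Int × Int)) : List Int → Int → List Int
  | [], _ => []
  | v :: vs, t => if t = 0 then [pvVal blocks v] else pvPick blocks vs (t - 1)

theorem pvPick_neg (blocks : List (Int × Int)) : ∀ (vs : List Int) (t : Int), t < 0 → pvPick blocks vs t = [] := by
  intro vs
  induction vs with
  | nil => intro t _; rfl
  | cons v vs ih =>
    intro t ht
    simp only [pvPick, if_neg (by omega : ¬ t = 0)]
    exact ih (t - 1) (by omega)

theorem go_singleton (c : Char) : ∀ (fuel : Nat) (l : List Char) (acc : Nat), l.length ≤ fuel →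
    PySem.Chars.count.go [c] fuel l acc = acc + l.count c := by
  intro fuel
  induction fuel with
  | zero => intro l acc h; cases l with
    | nil => simp [PySem.Chars.count.go]
    | cons x xs => simp at h
  | succ n ih => intro l acc h; cases l with
    | nil => simp [PySem.Chars.count.go]
    | cons x xs =>
      simp only [PySem.Chars.count.go]
      by_cases hx : x = c
      · subst hx
        have hpre : List.isPrefixOf [x] (x :: xs) = true := by simp [List.isPrefixOf]
        simp [hpre, ih xs (acc + 1) (by simpa using h)]
        omega
      · have hpre : List.isPrefixOf [c] (x :: xs) = false := by
          simp [List.isPrefixOf]; exact fun h' => absurd h'.symm hx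
        simp [hpre, ih xs acc (by simpa using h), hx]

theorem chars_count_singleton (l : List Char) (c : Char) : PySem.Chars.count l [c] = l.count c := by
  simp [PySem.Chars.count, go_singleton c l.length l 0 le_rfl]

-- the M-counts A recomputes by slicing, expressed structurally: mCounts
theorem mapF_eq_mCounts :
    ∀ (l p : List Char),
      (((PySem.List.enumerate l (p.length : Int)).filter (fun q => q.2 == 'N')).map (fun q => q.1)).map
          (fun x => (PySem.Chars.count (PySem.List.slice (p ++ l) none (some x)) ['M'] : Int))
        = mCounts l (p.count 'M' : Int) := by
  intro l
  induction l with
  | nil => intro p; simp [mCounts, PySem.List.enumerate]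
  | cons c cs ih =>
    intro p
    rw [PySem.List.enumerate_cons]
    have hstep : ((p.length : Int) + 1) = ((p ++ [c]).length : Int) := by simp
    by_cases hc : c = 'N'
    · subst hc
      rw [List.filter_cons_of_pos (by simp)]
      simp only [List.map_cons]
      rw [PySem.List.slice_to_natCast, List.take_left, chars_count_singleton]
      rw [hstep]
      have hassoc : p ++ 'N' :: cs = (p ++ ['N']) ++ cs := by simp
      rw [hassoc, ih (p ++ ['N'])]
      simp [mCounts]
    · have hfil : (((p.length : Int), c) :: PySem.List.enumerate cs ((p.length : Int) + 1)).filter (fun q => q.2 == 'N')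
          = (PySem.List.enumerate cs ((p.length : Int) + 1)).filter (fun q => q.2 == 'N') := by
        simp [hc]
      rw [hfil, hstep]
      have hassoc : (p ++ [c]) ++ cs = p ++ c :: cs := by simp
      rw [← hassoc, ih (p ++ [c])]
      by_cases hm : c = 'M'
      · subst hm; simp [mCounts]
      · simp [mCounts, hc, hm]

-- A's fold over the N positions, with F the preceding-'M' count A recomputes by slicing
theorem foldA_eq_pick (blocks : List (Int × Int)) (k : Int) (F : Int → Int) :
    ∀ (vs : List Int) (c0 : Int) (acc : List Int),
      (vs.foldl (fun (st : Int × List Int) x =>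
          if k == st.1 + 1 then (st.1 + 1, st.2 ++ [((PySem.List.pyGet? blocks (F x - 1)).getD (0, 0)).2])
          else (st.1 + 1, st.2)) (c0, acc)).2
        = acc ++ pvPick blocks (vs.map F) (k - c0 - 1) := by
  intro vs
  induction vs with
  | nil => intro c0 acc; simp [pvPick]
  | cons v vs ih =>
    intro c0 acc
    simp only [List.foldl_cons, List.map_cons]
    by_cases hk : k = c0 + 1
    · rw [if_pos (by simpa using hk), ih]
      rw [pvPick_neg blocks (vs.map F) (k - (c0 + 1) - 1) (by omega)]
      simp only [pvPick, if_pos (by omega : k - c0 - 1 = 0), pvVal]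
      simp
    · rw [if_neg (by simpa using hk), ih]
      simp only [pvPick, if_neg (by omega : ¬ k - c0 - 1 = 0)]
      have : k - (c0 + 1) - 1 = k - c0 - 1 - 1 := by omega
      rw [this]

-- B's loop equals head of pvPick over mCounts
theorem altGo_eq_pick (blocks : List (Int × Int)) (k : Int) :
    ∀ (l : List Char) (n m : Int),
      altGo blocks k l n m = (pvPick blocks (mCounts l m) (k - n)).headD 0 := by
  intro l
  induction l with
  | nil => intro n m; simp [altGo, mCounts, pvPick]
  | cons c cs ih =>
    intro n m
    by_cases hc : c = 'N'
    · subst hc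
      simp only [altGo, mCounts, reduceIte]
      by_cases hn : n = k
      · simp [pvPick, pvVal, hn]
      · rw [if_neg hn, ih (n + 1) m]
        have h1 : pvPick blocks (m :: mCounts cs m) (k - n) = pvPick blocks (mCounts cs m) (k - n - 1) := by
          simp only [pvPick, if_neg (by omega : ¬ k - n = 0)]
        rw [h1]
        have : k - (n + 1) = k - n - 1 := by omega
        rw [this]
    · by_cases hm : c = 'M'
      · subst hm
        simp only [altGo, if_neg (by decide : ¬ ('M' : Char) = 'N')]
        rw [ih n (m + 1)]
        simp [mCounts]
      · simp only [altGo, if_neg hc, if_neg hm]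
        rw [ih n m]
        simp [mCounts, hc, hm]

theorem headD_pyGet (zs : List Int) : (PySem.List.pyGet? zs 0).getD 0 = zs.headD 0 := by
  cases zs <;> simp [PySem.List.pyGet?_zero]

theorem ports_agree (cigar : String) (blocks : List (Int × Int)) (k : Int) (ct : List (Int × Int)) :
    define_block_two_N cigar blocks k ct = define_block_two_N_alt cigar blocks k ct := by
  have hmap := mapF_eq_mCounts cigar.toList []
  simp only [List.nil_append, List.length_nil, Nat.cast_zero, List.count_nil] at hmap
  have hfold := foldA_eq_pick blocks k
      (fun x => (PySem.Chars.count (PySem.List.slice cigar.toList none (some x)) ['M'] : Int))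
      (((PySem.List.enumerate cigar.toList).filter (fun p => p.2 == 'N')).map (fun p => p.1)) (-1) []
  simp only [] at hfold
  unfold define_block_two_N define_block_two_N_alt
  dsimp only []
  rw [hfold, hmap, altGo_eq_pick blocks k cigar.toList 0 0, headD_pyGet]
  norm_num

-- ===== VERDICT (by name: the statement is the Claim_ definition above) =====
theorem define_block_two_N_spec : Claim_equal_define_block_two_N := by
  intro cigar blocks k ct _ _
  exact ports_agree cigar blocks k ct
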